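-- pv_equiv track=rewrite | github.com/Basic-Nature/html_Parser_prototype | webapp/parser/utils/table_builder.py | prioritize_real_data_columns
-- ===== SOURCE A (Python) =====
-- def prioritize_real_data_columns(headers, data, required_cols=None):
--     """
--     Move columns with real data to the front for user review.
--     """
--     if required_cols is None:
--         required_cols = {"Grand Total", "Precinct", "Percent Reported", "Location"}
--     n_rows = len(data)
--     def col_score(h):
--         vals = [row.get(h, "") for row in data]
--         return sum(1 for v in vals if v not in ("", "0", 0, None))
--     scored = sorted(headers, key=lambda h: (h not in required_cols, -col_score(h)))
--     new_data = [{h: row.get(h, "") for h in scored} for row in data]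
--     return scored, new_data
-- ===== SOURCE B (Python) =====
-- def prioritize_real_data_columns(headers, data, required_cols=None):
--     """
--     Move columns with real data to the front for user review.
--     """
--     if required_cols is None:
--         required_cols = {"Grand Total", "Precinct", "Percent Reported", "Location"}
--     n_rows = len(data)
--
--     def count(h):
--         return sum(1 for row in data if row.get(h, "") not in ("", "0", 0, None))
--
--     # counting sort instead of a comparison sort: each header gets an explicit
--     # rank (required headers first, then by descending count); appending into
--     # per-rank buckets and reading them out in rank order is stable.
--     m = 2 * (n_rows + 1)
--     buckets = [[] for _ in range(m)]
--     for h in headers: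
--         rank = (0 if h in required_cols else n_rows + 1) + (n_rows - count(h))
--         buckets[rank].append(h)
--     scored = [h for b in buckets for h in b]
--     new_data = [{h: row.get(h, "") for h in scored} for row in data]
--     return scored, new_data
-- ===== Notes on version B (the rewrite author's own statement) =====
-- stated objective: alternative
-- what changed: B replaces A's comparison sort with a tuple key by a counting sort: it assigns each header an explicit integer rank (required-first, then descending non-empty count), appends headers into per-rank buckets in one pass, and concatenates the buckets in rank order (stable by construction).
import Mathlib
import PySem

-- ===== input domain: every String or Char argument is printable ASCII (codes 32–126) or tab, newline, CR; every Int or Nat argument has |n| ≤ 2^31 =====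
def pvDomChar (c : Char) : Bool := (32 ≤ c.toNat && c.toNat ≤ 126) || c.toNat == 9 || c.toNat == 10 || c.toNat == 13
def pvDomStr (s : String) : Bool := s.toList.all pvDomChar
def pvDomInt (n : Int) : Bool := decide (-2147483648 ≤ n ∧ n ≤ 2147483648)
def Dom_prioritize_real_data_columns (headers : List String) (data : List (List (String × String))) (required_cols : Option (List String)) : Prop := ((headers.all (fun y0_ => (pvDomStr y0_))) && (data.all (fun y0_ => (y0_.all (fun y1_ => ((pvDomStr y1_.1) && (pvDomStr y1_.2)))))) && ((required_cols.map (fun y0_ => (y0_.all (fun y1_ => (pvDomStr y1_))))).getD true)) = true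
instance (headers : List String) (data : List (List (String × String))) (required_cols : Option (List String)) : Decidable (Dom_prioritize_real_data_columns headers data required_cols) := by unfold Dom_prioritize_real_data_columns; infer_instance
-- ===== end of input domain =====

-- B replaces A's comparison sort (sorted with a tuple key) by a counting sort: an explicit
-- Nat rank per header and stable per-rank buckets read out in rank order (alternative algorithm).

-- ===== PORT A =====
-- shared lookup helper: Python's row.get(h, "") (rows are dicts; first-match association-list lookup)
def pvRowGet (row : List (String × String)) (h : String) : String :=
  PySem.Dict.getD (PySem.Dict.mk row) h ""

-- shared rebuild: the dict comprehension {h: row.get(h, "") for h in scored}, identical in A and B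
def pvRebuild (scored : List String) (data : List (List (String × String))) : List (List (String × String)) :=
  data.map (fun row => (scored.foldl (fun d h => d.insert h (pvRowGet row h)) PySem.Dict.empty).items)

-- A's col_score(h): vals = [row.get(h, "") for row in data]; sum(1 for v in vals if v not in ("", "0", 0, None))
-- (values are strings on this signature, so the membership test is v == "" or v == "0")
def pvColScore (data : List (List (String × String))) (h : String) : Int :=
  let vals := data.map (fun row => pvRowGet row h)
  (vals.map (fun v => if !(v == "" || v == "0") then (1 : Int) else 0)).sum

def prioritize_real_data_columns (headers : List String) (data : List (List (String × String))) (required_cols : Option (List String)) : List String × (List (List (String × String))) :=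
  let req := required_cols.getD (PySem.Set.ofList ["Grand Total", "Precinct", "Percent Reported", "Location"])
  let _n_rows : Int := data.length
  let scored := PySem.List.sorted2 headers (fun h => !(req.contains h)) (fun h => -(pvColScore data h)) false
  (scored, pvRebuild scored data)

-- ===== PORT B =====
-- B's count(h): sum(1 for row in data if row.get(h, "") not in ("", "0", 0, None)); a 0/1-sum
-- over the rows is a countP (PySem: sum_map_ite_one_zero); nonnegative, so a Nat here
def pvCount (data : List (List (String × String))) (h : String) : Nat :=
  data.countP (fun row => !(pvRowGet row h == "" || pvRowGet row h == "0"))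

-- B's rank: (0 if h in required_cols else n_rows + 1) + (n_rows - count(h)); count ≤ n_rows, so Nat subtraction is exact
def pvRank (req : List String) (data : List (List (String × String))) (h : String) : Nat :=
  (if req.contains h then 0 else data.length + 1) + (data.length - pvCount data h)

def prioritize_real_data_columns_alt (headers : List String) (data : List (List (String × String))) (required_cols : Option (List String)) : List String × (List (List (String × String))) :=
  let req := required_cols.getD (PySem.Set.ofList ["Grand Total", "Precinct", "Percent Reported", "Location"])
  let n_rows := data.length
  let m := 2 * (n_rows + 1)
  -- buckets = [[] for _ in range(m)]; for h in headers: buckets[rank].append(h)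
  -- (rank < m always, so the Python indexing is in range; List.getD/set is exact there)
  let buckets := headers.foldl
    (fun bs h =>
      let k := pvRank req data h
      bs.set k (bs.getD k [] ++ [h]))
    (List.replicate m ([] : List String))
  let scored := buckets.flatten   -- [h for b in buckets for h in b]
  (scored, pvRebuild scored data)

-- ===== PRECONDITION & SPEC =====
def Spec_prioritize_real_data_columns (headers : List String) (data : List (List (String × String))) (required_cols : Option (List String)) (out : List String × (List (List (String × String)))) : Prop := out = prioritize_real_data_columns_alt headers data required_cols
instance (headers : List String) (data : List (List (String × String))) (required_cols : Option (List String)) (out : List String × (List (List (String × String)))) : Decidable (Spec_prioritize_real_data_columns headers data required_cols out) := by unfold Spec_prioritize_real_data_columns; infer_instance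

-- ===== CLAIM (what is proved, stated in full; the proofs are below) =====
def Claim_equal_prioritize_real_data_columns : Prop := ∀ (headers : List String) (data : List (List (String × String))) (required_cols : Option (List String)), Dom_prioritize_real_data_columns headers data required_cols → Spec_prioritize_real_data_columns headers data required_cols (prioritize_real_data_columns headers data required_cols)

-- ===== LEMMAS AND PROOFS =====

-- A's Int score is B's Nat count
lemma pv_colScore_eq_count (data : List (List (String × String))) (h : String) :
    pvColScore data h = (pvCount data h : Int) := by
  induction data with
  | nil => simp [pvColScore, pvCount]
  | cons r d ih =>
    simp only [pvColScore, pvCount, List.map_cons, List.sum_cons, List.countP_cons] at *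
    split_ifs <;> simp_all <;> omega

lemma pv_count_le (data : List (List (String × String))) (h : String) :
    pvCount data h ≤ data.length :=
  List.countP_le_length

-- Bool/Nat core of the key comparison, stated over free variables
lemma pv_lex_rank_bool (ca cb n : Nat) (ha : ca ≤ n) (hb : cb ≤ n) (ra rb : Bool) :
    (decide ((!ra) < (!rb)) || (!decide ((!rb) < (!ra)) && decide (-(ca:Int) < -(cb:Int))))
    = decide ((if ra then 0 else n+1) + (n - ca) < (if rb then 0 else n+1) + (n - cb)) := by
  cases ra <;> cases rb <;> simp [Bool.lt_iff] <;> omega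

-- A's lexicographic tuple comparison IS the strict order of B's ranks
lemma pv_lex_eq_rank_lt (req : List String) (data : List (List (String × String))) (a b : String) :
    (decide ((!req.contains a) < (!req.contains b)) ||
      (!decide ((!req.contains b) < (!req.contains a)) && decide (-(pvColScore data a) < -(pvColScore data b))))
    = decide (pvRank req data a < pvRank req data b) := by
  have ha := pv_count_le data a
  have hb := pv_count_le data b
  simp only [pvRank, pv_colScore_eq_count]
  exact pv_lex_rank_bool _ _ _ (pv_count_le data a) (pv_count_le data b) _ _

-- insertBy with a rank order: given a split into a low part and a strictly-high part, x lands between them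
lemma pv_insertBy_split (R : String → Nat) (x : String) :
    ∀ (F S : List String), (∀ y ∈ F, ¬ R x < R y) → (∀ y ∈ S, R x < R y) →
      PySem.List.insertBy (fun a b => decide (R a < R b)) x (F ++ S) = F ++ x :: S := by
  intro F
  induction F with
  | nil =>
    intro S _ hS
    cases S with
    | nil => rfl
    | cons y ys =>
      simp only [List.nil_append, PySem.List.insertBy]
      rw [decide_eq_true (hS y (by simp))]
      simp
  | cons y F ih =>
    intro S hF hS
    simp only [List.cons_append, PySem.List.insertBy]
    rw [decide_eq_false (hF y (by simp))]
    simp [ih S (fun z hz => hF z (by simp [hz])) hS]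

-- the bucket-filling fold maintains "bucket k = filter (rank = k) of the processed prefix"
lemma pv_buckets_inv (R : String → Nat) (m : Nat) :
    ∀ (xs pre : List String), (∀ h ∈ xs, R h < m) →
      xs.foldl (fun bs h => bs.set (R h) (bs.getD (R h) [] ++ [h]))
          ((List.range m).map (fun k => pre.filter (fun h => R h == k)))
        = (List.range m).map (fun k => (pre ++ xs).filter (fun h => R h == k)) := by
  intro xs
  induction xs with
  | nil => intro pre _; simp
  | cons x xs ih =>
    intro pre hlt
    have hx : R x < m := hlt x (by simp)
    simp only [List.foldl_cons]
    have hstep :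
        ((List.range m).map (fun k => pre.filter (fun h => R h == k))).set (R x)
            (((List.range m).map (fun k => pre.filter (fun h => R h == k))).getD (R x) [] ++ [x])
          = (List.range m).map (fun k => (pre ++ [x]).filter (fun h => R h == k)) := by
      have hlen : R x < ((List.range m).map (fun k => pre.filter (fun h => R h == k))).length := by
        simpa using hx
      rw [List.getD_eq_getElem _ _ hlen]
      apply List.ext_getElem
      · simp
      · intro i hi hi'
        simp only [List.getElem_set, List.getElem_map, List.getElem_range] at *
        by_cases hik : i = R x
        · subst hik
          simp [List.filter_append]
        · simp [List.filter_append, Ne.symm hik]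
    rw [hstep, ih (pre ++ [x]) (fun h hm => hlt h (by simp [hm]))]
    simp

-- stable insertion sort by a Nat rank is the counting sort: buckets in rank order
lemma pv_countingSort (R : String → Nat) (m : Nat) :
    ∀ (xs : List String), (∀ h ∈ xs, R h < m) →
      xs.foldl (fun acc x => PySem.List.insertBy (fun a b => decide (R a < R b)) x acc) []
        = ((List.range m).map (fun k => xs.filter (fun h => R h == k))).flatten := by
  intro xs
  induction xs using List.reverseRecOn with
  | nil => simp
  | append_singleton xs x ih =>
    intro hlt
    have hx : R x < m := hlt x (by simp)
    have hxs : ∀ h ∈ xs, R h < m := fun h hm => hlt h (by simp [hm])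
    rw [List.foldl_append, List.foldl_cons, List.foldl_nil, ih hxs]
    -- split range m at R x + 1
    obtain ⟨t, ht⟩ : ∃ t, m = (R x + 1) + t := ⟨m - (R x + 1), by omega⟩
    subst ht
    rw [show List.range (R x + 1 + t) = List.range (R x + 1) ++ (List.range t).map (fun j => R x + 1 + j) from List.range_add]
    set F := ((List.range (R x + 1)).map (fun k => xs.filter (fun h => R h == k))).flatten with hF
    set S := (((List.range t).map (fun j => R x + 1 + j)).map (fun k => xs.filter (fun h => R h == k))).flatten with hS
    have hsplit :
        ((List.range (R x + 1) ++ (List.range t).map (fun j => R x + 1 + j)).map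
            (fun k => xs.filter (fun h => R h == k))).flatten = F ++ S := by
      simp [hF, hS]
    rw [hsplit]
    have hFle : ∀ y ∈ F, ¬ R x < R y := by
      intro y hy
      simp only [hF, List.mem_flatten, List.mem_map, List.mem_range] at hy
      obtain ⟨l, ⟨k, hk, rfl⟩, hyl⟩ := hy
      have : R y = k := by simpa using (List.of_mem_filter hyl)
      omega
    have hSgt : ∀ y ∈ S, R x < R y := by
      intro y hy
      simp only [hS, List.mem_flatten, List.mem_map, List.mem_range] at hy
      obtain ⟨l, ⟨k, ⟨j, hj, rfl⟩, rfl⟩, hyl⟩ := hy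
      have : R y = R x + 1 + j := by simpa using (List.of_mem_filter hyl)
      omega
    rw [pv_insertBy_split R x F S hFle hSgt]
    -- now show the buckets of xs ++ [x] are F ++ x :: S
    rw [List.map_append, List.flatten_append]
    have hSnew :
        (((List.range t).map (fun j => R x + 1 + j)).map
            (fun k => (xs ++ [x]).filter (fun h => R h == k))).flatten = S := by
      simp only [hS, List.map_map]
      congr 1
      apply List.map_congr_left
      intro j hj
      simp only [Function.comp_apply, List.filter_append]
      have : (R x == R x + 1 + j) = false := by simp; omega
      simp [this]
    have hFnew :
        ((List.range (R x + 1)).map (fun k => (xs ++ [x]).filter (fun h => R h == k))).flatten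
          = F ++ [x] := by
      rw [List.range_succ, List.map_append, List.flatten_append]
      simp only [List.map_cons, List.map_nil, List.flatten_cons, List.flatten_nil, List.append_nil]
      have h1 : ((List.range (R x)).map (fun k => (xs ++ [x]).filter (fun h => R h == k)))
          = (List.range (R x)).map (fun k => xs.filter (fun h => R h == k)) := by
        apply List.map_congr_left
        intro k hk
        rw [List.mem_range] at hk
        simp only [List.filter_append]
        have : (R x == k) = false := by simp; omega
        simp [this]
      have h2 : (xs ++ [x]).filter (fun h => R h == R x) = xs.filter (fun h => R h == R x) ++ [x] := by
        simp [List.filter_append]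
      rw [h1, h2]
      simp [hF, List.range_succ]
    rw [hSnew, hFnew]
    simp

-- ===== VERDICT (by name: the statement is the Claim_ definition above) =====
theorem prioritize_real_data_columns_spec : Claim_equal_prioritize_real_data_columns := by
  intro headers data required_cols _
  unfold Spec_prioritize_real_data_columns
  unfold prioritize_real_data_columns prioritize_real_data_columns_alt
  simp only []
  set req := required_cols.getD (PySem.Set.ofList ["Grand Total", "Precinct", "Percent Reported", "Location"]) with hreq
  set R := pvRank req data with hR
  have hm : ∀ h ∈ headers, R h < 2 * (data.length + 1) := by
    intro h _
    have := pv_count_le data h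
    simp only [hR, pvRank]
    split <;> omega
  have hsorted :
      PySem.List.sorted2 headers (fun h => !(req.contains h)) (fun h => -(pvColScore data h)) false
        = headers.foldl (fun acc x => PySem.List.insertBy (fun a b => decide (R a < R b)) x acc) [] := by
    simp only [PySem.List.sorted2, if_neg (by decide : ¬ (false = true))]
    congr 1
    funext acc x
    congr 1
    funext a b
    exact pv_lex_eq_rank_lt req data a b
  have hbuckets :
      (headers.foldl
          (fun bs h => bs.set (R h) (bs.getD (R h) [] ++ [h]))
          (List.replicate (2 * (data.length + 1)) ([] : List String))).flatten
        = ((List.range (2 * (data.length + 1))).map (fun k => headers.filter (fun h => R h == k))).flatten := by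
    have hinit : (List.replicate (2 * (data.length + 1)) ([] : List String))
        = (List.range (2 * (data.length + 1))).map (fun k => ([] : List String).filter (fun h => R h == k)) := by
      simp [List.map_const', List.filter_nil]
    rw [hinit, pv_buckets_inv R _ headers [] hm]
    simp
  rw [hsorted, pv_countingSort R _ headers hm, ← hbuckets]
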